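-- pv_equiv track=rewrite | github.com/song-dh/algorithm | 프로그래머스/1/42840. 모의고사/모의고사.py | solution
-- ===== SOURCE A (Python) =====
-- def solution(answers):
--     s1AnswerList = [1, 2, 3, 4, 5]
--     s2AnswerList = [2, 1, 2, 3, 2, 4, 2, 5]
--     s3AnswerList = [3, 3, 1, 1, 2, 2, 4, 4, 5, 5]
--
--     s1 = s2 = s3 = 0
--     for i, v in enumerate(answers):
--         if s1AnswerList[i%5] == v:
--             s1 += 1
--         if s2AnswerList[i%8] == v:
--             s2 += 1
--         if s3AnswerList[i%10] == v:
--             s3 += 1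
--
--     scores = [s1, s2, s3]
--     m = max(scores)
--     return [i + 1 for i, v in enumerate(scores) if m == v]
-- ===== SOURCE B (Python) =====
-- def solution(answers):
--     patterns = [[1, 2, 3, 4, 5],
--                 [2, 1, 2, 3, 2, 4, 2, 5],
--                 [3, 3, 1, 1, 2, 2, 4, 4, 5, 5]]
--     scores = []
--     for p in patterns:
--         rest = p
--         c = 0
--         for a in answers:
--             if not rest:
--                 rest = p
--             c += a == rest[0]
--             rest = rest[1:]
--         scores.append(c)
--     m = max(scores)
--     return [i + 1 for i, v in enumerate(scores) if v == m]
-- ===== Notes on version B (the rewrite author's own statement) =====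
-- stated objective: alternative
-- what changed: Loop interchange: instead of one fused pass over answers updating three counters via modular indexing, B makes a separate pass per pattern, consuming the pattern as a list that is refilled when exhausted (no index arithmetic at all).
import Mathlib
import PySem

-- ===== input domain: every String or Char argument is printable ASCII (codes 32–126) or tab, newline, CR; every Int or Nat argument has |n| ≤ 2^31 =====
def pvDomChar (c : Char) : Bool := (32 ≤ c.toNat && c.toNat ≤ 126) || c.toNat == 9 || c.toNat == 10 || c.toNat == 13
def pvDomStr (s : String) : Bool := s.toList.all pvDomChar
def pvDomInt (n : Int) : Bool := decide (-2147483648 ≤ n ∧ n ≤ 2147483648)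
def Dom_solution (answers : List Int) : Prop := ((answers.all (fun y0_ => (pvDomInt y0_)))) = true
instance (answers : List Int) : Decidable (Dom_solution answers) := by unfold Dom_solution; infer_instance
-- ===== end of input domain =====

-- B replaces A's fused single pass with modular indexing by one pass per pattern that
-- consumes the pattern as a list, refilling it when exhausted (objective: alternative).

-- the three fixed answer patterns (shared literals of both programs)
def pat1 : List Int := [1, 2, 3, 4, 5]
def pat2 : List Int := [2, 1, 2, 3, 2, 4, 2, 5]
def pat3 : List Int := [3, 3, 1, 1, 2, 2, 4, 4, 5, 5]

-- ===== PORT A =====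
-- the fused 'for i, v in enumerate(answers)' loop of A, as structural recursion with counter i;
-- the index i%5 / i%8 / i%10 is always in range, so getD is exact Python indexing here
def solutionLoop : List Int → Nat → Int → Int → Int → Int × Int × Int
  | [], _, s1, s2, s3 => (s1, s2, s3)
  | v :: vs, i, s1, s2, s3 =>
      solutionLoop vs (i + 1)
        (if pat1.getD (i % 5) 0 = v then s1 + 1 else s1)
        (if pat2.getD (i % 8) 0 = v then s2 + 1 else s2)
        (if pat3.getD (i % 10) 0 = v then s3 + 1 else s3)

def solution (answers : List Int) : List Int :=
  let (s1, s2, s3) := solutionLoop answers 0 0 0 0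
  let scores : List Int := [s1, s2, s3]
  let m : Int := (PySem.List.max? scores (fun x => x)).getD 0   -- max(scores); scores nonempty, getD unused
  (PySem.List.enumerate scores 0).filterMap
    (fun iv => if m = iv.2 then some (iv.1 + 1) else none)

-- ===== PORT B =====
-- inner 'for a in answers' loop of B: state (rest, c); rest[0] is exact via headD since the
-- refilled rest is never empty (the pattern is a nonempty literal)
def stepB (p : List Int) (st : List Int × Int) (a : Int) : List Int × Int :=
  let rest := if st.1 = [] then p else st.1
  (rest.drop 1, st.2 + (if a = rest.headD 0 then 1 else 0))

def bScore (p : List Int) (answers : List Int) : Int :=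
  (answers.foldl (stepB p) (p, 0)).2

def solution_alt (answers : List Int) : List Int :=
  let patterns : List (List Int) := [pat1, pat2, pat3]
  let scores := patterns.map (fun p => bScore p answers)
  let m : Int := (PySem.List.max? scores (fun x => x)).getD 0
  (PySem.List.enumerate scores 0).filterMap
    (fun iv => if m = iv.2 then some (iv.1 + 1) else none)

-- ===== PRECONDITION & SPEC =====
def Spec_solution (answers : List Int) (out : List Int) : Prop := out = solution_alt answers
instance (answers : List Int) (out : List Int) : Decidable (Spec_solution answers out) := by unfold Spec_solution; infer_instance

-- ===== CLAIM (what is proved, stated in full; the proofs are below) =====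
def Claim_equal_solution : Prop := ∀ (answers : List Int), Dom_solution answers → Spec_solution answers (solution answers)

-- ===== LEMMAS AND PROOFS =====

-- the accumulator of B's inner loop is additive
lemma foldl_stepB_add (p : List Int) :
    ∀ (as r : List Int) (c : Int),
      (as.foldl (stepB p) (r, c)).2 = c + (as.foldl (stepB p) (r, 0)).2 := by
  intro as
  induction as with
  | nil => intro r c; simp
  | cons a as ih =>
      intro r c
      simp only [List.foldl_cons, stepB]
      rw [ih ((if r = [] then p else r).drop 1)
            (c + (if a = (if r = [] then p else r).headD 0 then 1 else 0)),
          ih ((if r = [] then p else r).drop 1)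
            (0 + (if a = (if r = [] then p else r).headD 0 then 1 else 0))]
      ring

-- an exhausted rest-list behaves like the refilled pattern
lemma foldl_stepB_refill (p : List Int) (hp : p ≠ []) (as : List Int) (c : Int) :
    (as.foldl (stepB p) ([], c)).2 = (as.foldl (stepB p) (p, c)).2 := by
  cases as with
  | nil => rfl
  | cons a as =>
      simp only [List.foldl_cons, stepB]
      simp [hp]

-- one step of B's loop, when rest = p.drop (i % p.length), advances the index by one
lemma cyc_step (p : List Int) (hp : p ≠ []) (v : Int) (vs : List Int) (i : Nat) :
    ((v :: vs).foldl (stepB p) (p.drop (i % p.length), 0)).2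
      = (if v = p.getD (i % p.length) 0 then 1 else 0)
        + (vs.foldl (stepB p) (p.drop ((i + 1) % p.length), 0)).2 := by
  have hlen : 0 < p.length := List.length_pos_of_ne_nil hp
  have hlt : i % p.length < p.length := Nat.mod_lt _ hlen
  have hne : p.drop (i % p.length) ≠ [] := by
    simp only [ne_eq, List.drop_eq_nil_iff]
    omega
  have hcons : p.drop (i % p.length) = p[i % p.length] :: p.drop (i % p.length + 1) :=
    List.drop_eq_getElem_cons hlt
  have hgetD : p.getD (i % p.length) 0 = p[i % p.length] := List.getD_eq_getElem p 0 hlt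
  have hsucc : (i + 1) % p.length = (i % p.length + 1) % p.length := by
    have e : i + 1 = (i % p.length + 1) + (i / p.length) * p.length := by
      have := Nat.mod_add_div' i p.length
      omega
    rw [e, Nat.add_mul_mod_self_right]
  simp only [List.foldl_cons, stepB, if_neg hne]
  rw [hcons]
  simp only [List.headD_cons, List.drop_one, List.tail_cons]
  rw [hgetD, foldl_stepB_add]
  rcases Nat.lt_or_ge (i % p.length + 1) p.length with h | h
  · have h2 : (i + 1) % p.length = i % p.length + 1 := by
      rw [hsucc, Nat.mod_eq_of_lt h]
    rw [h2]; ring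
  · have h1 : i % p.length + 1 = p.length := by omega
    have h2 : (i + 1) % p.length = 0 := by rw [hsucc, h1, Nat.mod_self]
    rw [h1, h2, List.drop_length, foldl_stepB_refill p hp, List.drop_zero]
    ring

-- specialised steps for the three literal patterns (lengths 5, 8, 10 are rfl)
lemma cyc_step1 (v : Int) (vs : List Int) (i : Nat) :
    ((v :: vs).foldl (stepB pat1) (pat1.drop (i % 5), 0)).2
      = (if v = pat1.getD (i % 5) 0 then 1 else 0)
        + (vs.foldl (stepB pat1) (pat1.drop ((i + 1) % 5), 0)).2 :=
  cyc_step pat1 (by decide) v vs i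

lemma cyc_step2 (v : Int) (vs : List Int) (i : Nat) :
    ((v :: vs).foldl (stepB pat2) (pat2.drop (i % 8), 0)).2
      = (if v = pat2.getD (i % 8) 0 then 1 else 0)
        + (vs.foldl (stepB pat2) (pat2.drop ((i + 1) % 8), 0)).2 :=
  cyc_step pat2 (by decide) v vs i

lemma cyc_step3 (v : Int) (vs : List Int) (i : Nat) :
    ((v :: vs).foldl (stepB pat3) (pat3.drop (i % 10), 0)).2
      = (if v = pat3.getD (i % 10) 0 then 1 else 0)
        + (vs.foldl (stepB pat3) (pat3.drop ((i + 1) % 10), 0)).2 :=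
  cyc_step pat3 (by decide) v vs i

-- A's fused loop computes exactly B's three per-pattern scores
lemma loop_eq :
    ∀ (as : List Int) (i : Nat) (s1 s2 s3 : Int),
      solutionLoop as i s1 s2 s3 =
        (s1 + (as.foldl (stepB pat1) (pat1.drop (i % 5), 0)).2,
         s2 + (as.foldl (stepB pat2) (pat2.drop (i % 8), 0)).2,
         s3 + (as.foldl (stepB pat3) (pat3.drop (i % 10), 0)).2) := by
  intro as
  induction as with
  | nil => intro i s1 s2 s3; simp [solutionLoop]
  | cons v vs ih =>
      intro i s1 s2 s3
      simp only [solutionLoop]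
      rw [ih, cyc_step1, cyc_step2, cyc_step3]
      simp only [Prod.mk.injEq]
      refine ⟨?_, ?_, ?_⟩ <;>
        · split_ifs with h1 h2 h3
          · ring
          · exact absurd h1.symm h2
          · exact absurd h3.symm h1
          · ring

-- ===== VERDICT (by name: the statement is the Claim_ definition above) =====
theorem solution_spec : Claim_equal_solution := by
  intro answers _
  unfold Spec_solution solution solution_alt
  rw [loop_eq answers 0 0 0 0]
  simp only [Nat.zero_mod, List.drop_zero, zero_add, List.map, bScore]
  rfl
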